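-- pv_equiv track=rewrite | github.com/Dev240204/Bda | exam/03_8puzzle_a.py | right_move
-- ===== SOURCE A (Python) =====
-- import copy
--
-- SIZE = 3
--
-- def right_move(state):
--     new_state = copy.deepcopy(state)
--
--     for i in range(SIZE):
--         for j in range(SIZE-1):
--             if new_state[i][j] == 0 and j<SIZE-1:
--                 new_state[i][j], new_state[i][j + 1] = new_state[i][j + 1], new_state[i][j]
--                 return new_state
--
--     return None  # No right move possible
-- ===== SOURCE B (Python) =====
-- SIZE = 3
--
-- def _shift(row, c):
--     # rebuild the row functionally: blank at column c slides right
--     if c >= SIZE - 1: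
--         return None
--     if row[c] == 0:
--         return row[:c] + [row[c + 1], 0] + row[c + 2:]
--     return _shift(row, c + 1)
--
-- def _go(state, i):
--     if i >= SIZE:
--         return None  # No right move possible
--     new_row = _shift(state[i], 0)
--     if new_row is None:
--         return _go(state, i + 1)
--     return [list(r) for r in state[:i]] + [new_row] + [list(r) for r in state[i + 1:]]
--
-- def right_move(state):
--     return _go(state, 0)
-- ===== Notes on version B (the rewrite author's own statement) =====
-- stated objective: alternative
-- what changed: B drops the copy-then-mutate nested for-loop: it recurses over rows, rebuilds the first row with a movable blank functionally by slicing (row[:c]+[row[c+1],0]+row[c+2:]), and assembles the result board from slices, with no copy module and no in-place mutation.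
import Mathlib
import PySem

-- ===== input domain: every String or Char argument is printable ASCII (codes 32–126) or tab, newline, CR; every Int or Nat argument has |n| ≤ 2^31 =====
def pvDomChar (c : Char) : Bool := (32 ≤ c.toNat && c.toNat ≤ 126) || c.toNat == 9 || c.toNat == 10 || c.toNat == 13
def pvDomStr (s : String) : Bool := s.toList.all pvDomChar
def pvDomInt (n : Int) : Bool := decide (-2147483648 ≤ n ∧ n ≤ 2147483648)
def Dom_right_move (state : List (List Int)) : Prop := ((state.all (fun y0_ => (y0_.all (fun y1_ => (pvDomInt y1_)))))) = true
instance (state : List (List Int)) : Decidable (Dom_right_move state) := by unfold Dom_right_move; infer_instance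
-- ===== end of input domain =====

-- B replaces A's copy-then-mutate nested loop by row recursion with a functional, slice-based
-- rebuild of the changed row; same values on the stated precondition (equal cost, no speed claim).

-- ===== PORT A =====
-- swap cells (i,j) and (i,j+1), as the Python tuple assignment does (RHS read first)
def rmSwap (state : List (List Int)) (i j : Nat) : List (List Int) :=
  let row := state.getD i []
  state.set i ((row.set j (row.getD (j + 1) 0)).set (j + 1) (row.getD j 0))

-- A's nested 'for i in range(3): for j in range(2)' loop, as recursion over the (i,j) pairs
def rmGo (state : List (List Int)) : List (Nat × Nat) → Option (List (List Int))
  | [] => none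
  | (i, j) :: rest =>
    if (state.getD i []).getD j 0 == 0 && decide (j < 2) then some (rmSwap state i j)
    else rmGo state rest

def right_move (state : List (List Int)) : Option (List (List Int)) :=
  rmGo state [(0, 0), (0, 1), (1, 0), (1, 1), (2, 0), (2, 1)]

-- ===== PORT B =====
-- Source B's _shift: recurse on the column, rebuild the row by slicing when the blank is found
-- (the last argument is the structural countdown for the 'c >= SIZE-1' stop, SIZE-1 = 2 steps)
def rmShift (row : List Int) (c : Nat) : Nat → Option (List Int)
  | 0 => none
  | fuel + 1 =>
    if row.getD c 0 == 0 then
      some (row.take c ++ [row.getD (c + 1) 0, 0] ++ row.drop (c + 2))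
    else rmShift row (c + 1) fuel

-- Source B's _go: recurse on the row index, assemble the board from slices around the new row
def rmGoB (state : List (List Int)) (i : Nat) : Nat → Option (List (List Int))
  | 0 => none
  | fuel + 1 =>
    match rmShift (state.getD i []) 0 2 with
    | some nr => some (state.take i ++ nr :: state.drop (i + 1))
    | none => rmGoB state (i + 1) fuel

def right_move_alt (state : List (List Int)) : Option (List (List Int)) :=
  rmGoB state 0 3

-- ===== PRECONDITION & SPEC =====
-- rowPass: the scan crosses this row without raising and without finding a movable blank
def rowPass (r : List Int) : Prop := 2 ≤ r.length ∧ r.getD 0 0 ≠ 0 ∧ r.getD 1 0 ≠ 0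
-- rowFind: the scan stops in this row (blank in column 0, or column 0 nonzero and blank in
-- column 1 with a right neighbour to swap with)
def rowFind (r : List Int) : Prop :=
  (2 ≤ r.length ∧ r.getD 0 0 = 0) ∨ (3 ≤ r.length ∧ r.getD 0 0 ≠ 0 ∧ r.getD 1 0 = 0)

-- Pre_ is exactly the boards on which the Python A returns (no IndexError): the row-major scan
-- of columns 0-1 either stops at a movable blank after crossing only well-formed blank-free
-- rows, or crosses all three rows of a full board and returns None.
def Pre_right_move (state : List (List Int)) : Prop :=
  rowFind (state.getD 0 []) ∨ (rowPass (state.getD 0 []) ∧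
    (rowFind (state.getD 1 []) ∨ (rowPass (state.getD 1 []) ∧
      (rowFind (state.getD 2 []) ∨ (3 ≤ state.length ∧ rowPass (state.getD 2 []))))))
instance (state : List (List Int)) : Decidable (Pre_right_move state) := by
  unfold Pre_right_move rowFind rowPass; infer_instance
def pvWitness_right_move : List (List Int) := [[1, 2, 3], [4, 0, 5], [6, 7, 8]]

def Spec_right_move (state : List (List Int)) (out : Option (List (List Int))) : Prop :=
  out = right_move_alt state
instance (state : List (List Int)) (out : Option (List (List Int))) : Decidable (Spec_right_move state out) := by unfold Spec_right_move; infer_instance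

-- ===== CLAIM (what is proved, stated in full; the proofs are below) =====
def Claim_equal_right_move : Prop := ∀ (state : List (List Int)), Dom_right_move state → Pre_right_move state → Spec_right_move state (right_move state)

-- ===== LEMMAS AND PROOFS =====

-- ===== VERDICT (by name: the statement is the Claim_ definition above) =====
theorem right_move_spec : Claim_equal_right_move := by
  intro state _ hpre
  simp only [Spec_right_move, right_move, right_move_alt]
  rcases hpre with hf0 | ⟨hp0, hf1 | ⟨hp1, hf2 | ⟨hlen, hp2⟩⟩⟩
  · -- scan stops in row 0
    rcases state with _ | ⟨r0, rest⟩
    · rcases hf0 with ⟨h, _⟩ | ⟨h, _⟩ <;> simp at h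
    rcases hf0 with ⟨hl, hz⟩ | ⟨hl, ha, hz⟩
    · rcases r0 with _ | ⟨a, _ | ⟨b, t⟩⟩ <;> simp at hl hz ⊢
      simp [rmGo, rmGoB, rmShift, rmSwap, hz]
    · rcases r0 with _ | ⟨a, _ | ⟨b, _ | ⟨c, t⟩⟩⟩ <;> simp at hl hz ha ⊢
      simp [rmGo, rmGoB, rmShift, rmSwap, ha, hz]
  · -- row 0 passes, scan stops in row 1
    obtain ⟨hl0, ha0, hb0⟩ := hp0
    rcases state with _ | ⟨r0, _ | ⟨r1, rest⟩⟩
    · simp at hl0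
    · rcases hf1 with ⟨h, _⟩ | ⟨h, _⟩ <;> simp at h
    rcases r0 with _ | ⟨x, _ | ⟨y, t0⟩⟩ <;> simp at hl0 ha0 hb0 ⊢
    rcases hf1 with ⟨hl, hz⟩ | ⟨hl, ha, hz⟩
    · rcases r1 with _ | ⟨a, _ | ⟨b, t⟩⟩ <;> simp at hl hz ⊢
      simp [rmGo, rmGoB, rmShift, rmSwap, ha0, hb0, hz]
    · rcases r1 with _ | ⟨a, _ | ⟨b, _ | ⟨c, t⟩⟩⟩ <;> simp at hl hz ha ⊢
      simp [rmGo, rmGoB, rmShift, rmSwap, ha0, hb0, ha, hz]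
  · -- rows 0-1 pass, scan stops in row 2
    obtain ⟨hl0, ha0, hb0⟩ := hp0
    obtain ⟨hl1, ha1, hb1⟩ := hp1
    rcases state with _ | ⟨r0, _ | ⟨r1, _ | ⟨r2, rest⟩⟩⟩
    · simp at hl0
    · simp at hl1
    · rcases hf2 with ⟨h, _⟩ | ⟨h, _⟩ <;> simp at h
    rcases r0 with _ | ⟨x0, _ | ⟨y0, t0⟩⟩ <;> simp at hl0 ha0 hb0 ⊢
    rcases r1 with _ | ⟨x1, _ | ⟨y1, t1⟩⟩ <;> simp at hl1 ha1 hb1 ⊢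
    rcases hf2 with ⟨hl, hz⟩ | ⟨hl, ha, hz⟩
    · rcases r2 with _ | ⟨a, _ | ⟨b, t⟩⟩ <;> simp at hl hz ⊢
      simp [rmGo, rmGoB, rmShift, rmSwap, ha0, hb0, ha1, hb1, hz]
    · rcases r2 with _ | ⟨a, _ | ⟨b, _ | ⟨c, t⟩⟩⟩ <;> simp at hl hz ha ⊢
      simp [rmGo, rmGoB, rmShift, rmSwap, ha0, hb0, ha1, hb1, ha, hz]
  · -- full board, no movable blank: both return none
    obtain ⟨hl0, ha0, hb0⟩ := hp0
    obtain ⟨hl1, ha1, hb1⟩ := hp1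
    obtain ⟨hl2, ha2, hb2⟩ := hp2
    rcases state with _ | ⟨r0, _ | ⟨r1, _ | ⟨r2, rest⟩⟩⟩ <;> simp at hlen
    rcases r0 with _ | ⟨x0, _ | ⟨y0, t0⟩⟩ <;> simp at hl0 ha0 hb0 ⊢
    rcases r1 with _ | ⟨x1, _ | ⟨y1, t1⟩⟩ <;> simp at hl1 ha1 hb1 ⊢
    rcases r2 with _ | ⟨x2, _ | ⟨y2, t2⟩⟩ <;> simp at hl2 ha2 hb2 ⊢
    simp [rmGo, rmGoB, rmShift, ha0, hb0, ha1, hb1, ha2, hb2]
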